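-- pv_equiv track=rewrite | github.com/ltrujello/Finite_Abelian_Groups | finite_abelian_groups.py | decompose_ahead
-- ===== SOURCE A (Python) =====
-- def decompose_ahead(prime_pows):
--     "The input is the list of tuples, where the first coordinate is a prime, "
--     "the second coordinate is the power. The function returns a list of list, "
--     "where each sublist  contains all products of a prime to its power."
--     "This is achieved by recurison."
--     if len(prime_pows) == 0:
--         return []
--     prime = prime_pows[0][0] #the prime
--     power = prime_pows[0][1] #the prime's power
--     prods = []
--     for i in range(1, prime_pows[0][1] + 1):
--         prods += [[prime**i] + (power - i)*[prime]] #one at a time, raises the prime to its power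
--     return [prods] + decompose_ahead(prime_pows[1:])#moves on to the next prime
-- ===== SOURCE B (Python) =====
-- def decompose_ahead(prime_pows):
--     result = []
--     for prime, power in prime_pows:
--         result.append([[prime**i] + (power - i) * [prime] for i in range(1, power + 1)])
--     return result
-- ===== Notes on version B (the rewrite author's own statement) =====
-- stated objective: idiomatic
-- what changed: Replaces the linear head/tail-slicing recursion and the inner accumulation loop with a single iterative forward pass appending a per-prime list comprehension.
import Mathlib
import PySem

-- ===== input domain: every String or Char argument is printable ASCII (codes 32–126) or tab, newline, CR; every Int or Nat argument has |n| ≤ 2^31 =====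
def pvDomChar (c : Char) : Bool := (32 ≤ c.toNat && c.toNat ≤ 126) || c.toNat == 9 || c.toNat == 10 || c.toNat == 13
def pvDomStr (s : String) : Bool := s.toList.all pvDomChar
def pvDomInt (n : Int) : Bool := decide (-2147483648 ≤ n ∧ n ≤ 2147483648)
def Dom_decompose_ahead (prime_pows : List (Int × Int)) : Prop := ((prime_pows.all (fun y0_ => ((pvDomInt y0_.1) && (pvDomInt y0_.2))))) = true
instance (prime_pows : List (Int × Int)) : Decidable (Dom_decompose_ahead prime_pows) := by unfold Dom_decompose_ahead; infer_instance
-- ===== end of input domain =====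

-- B replaces A's head/tail recursion with one iterative pass over the input (idiomatic; no speed claim).
-- ===== PORT A =====
def decompose_ahead : List (Int × Int) → List (List (List Int))
  | [] => []
  | hd :: tl =>
    let prime := hd.1
    let power := hd.2
    let prods := (PySem.List.pyRange 1 (power + 1) 1).foldl
      (fun acc i => acc ++ [[prime ^ i.toNat] ++ List.replicate (power - i).toNat prime]) []
    [prods] ++ decompose_ahead tl

-- ===== PORT B =====
def decompose_ahead_alt (prime_pows : List (Int × Int)) : List (List (List Int)) :=
  prime_pows.foldl
    (fun result pp =>
      result ++ [(PySem.List.pyRange 1 (pp.2 + 1) 1).map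
        (fun i => [pp.1 ^ i.toNat] ++ List.replicate (pp.2 - i).toNat pp.1)]) []

-- ===== PRECONDITION & SPEC =====
def Spec_decompose_ahead (prime_pows : List (Int × Int)) (out : List (List (List Int))) : Prop := out = decompose_ahead_alt prime_pows
instance (prime_pows : List (Int × Int)) (out : List (List (List Int))) : Decidable (Spec_decompose_ahead prime_pows out) := by unfold Spec_decompose_ahead; infer_instance

-- ===== CLAIM (what is proved, stated in full; the proofs are below) =====
def Claim_equal_decompose_ahead : Prop := ∀ (prime_pows : List (Int × Int)), Dom_decompose_ahead prime_pows → Spec_decompose_ahead prime_pows (decompose_ahead prime_pows)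

-- ===== LEMMAS AND PROOFS =====

-- ===== VERDICT (by name: the statement is the Claim_ definition above) =====
theorem decompose_ahead_eq (l : List (Int × Int)) : decompose_ahead l = decompose_ahead_alt l := by
  induction l with
  | nil => rfl
  | cons hd tl ih =>
    simp only [decompose_ahead, decompose_ahead_alt,
      PySem.List.foldl_append_singleton_eq_map] at *
    simp [ih]

-- ===== VERDICT =====
theorem decompose_ahead_spec : Claim_equal_decompose_ahead := by
  intro l _
  unfold Spec_decompose_ahead
  exact decompose_ahead_eq l
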